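-- pv_equiv track=rewrite | github.com/akstspace/air-accidents-data | scraper/src/aircraft_tracker/scraper.py | _is_internal_link
-- ===== SOURCE A (Python) =====
-- def _is_internal_link(href) -> bool:
--     """True if href points to an actual Wikipedia article (not meta-pages)."""
--     if not href:
--         return False
--     bad_prefixes = (
--         "Special:", "Wikipedia:", "Help:", "Template:", "Template_talk:",
--         "Talk:", "User:", "Category:", "Portal:", "File:",
--     )
--     return href.startswith("/wiki/") and not any(
--         href.startswith(f"/wiki/{p}") for p in bad_prefixes
--     )
-- ===== SOURCE B (Python) =====
-- _BAD_PREFIXES = (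
--     "Special:", "Wikipedia:", "Help:", "Template:", "Template_talk:",
--     "Talk:", "User:", "Category:", "Portal:", "File:",
-- )
--
--
-- def _build_trie(words):
--     root = {}
--     for w in words:
--         node = root
--         for ch in w:
--             node = node.setdefault(ch, {})
--         node[None] = True  # terminal marker
--     return root
--
--
-- _BAD_TRIE = _build_trie("/wiki/" + p for p in _BAD_PREFIXES)
--
--
-- def _is_internal_link(href) -> bool:
--     """True if href points to an actual Wikipedia article (not meta-pages)."""
--     if not href or not href.startswith("/wiki/"):
--         return False
--     node = _BAD_TRIE
--     for ch in href:
--         if None in node: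
--             return False  # a bad prefix has been fully matched
--         node = node.get(ch)
--         if node is None:
--             return True   # walked off the trie: no bad prefix applies
--     return None not in node
-- ===== Notes on version B (the rewrite author's own statement) =====
-- stated objective: alternative
-- what changed: B builds a character trie of the ten bad wiki-namespace prefixes once at module load and decides by a single character-by-character walk of href through the trie, instead of A's any()-scan calling startswith for every bad prefix.
import Mathlib
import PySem

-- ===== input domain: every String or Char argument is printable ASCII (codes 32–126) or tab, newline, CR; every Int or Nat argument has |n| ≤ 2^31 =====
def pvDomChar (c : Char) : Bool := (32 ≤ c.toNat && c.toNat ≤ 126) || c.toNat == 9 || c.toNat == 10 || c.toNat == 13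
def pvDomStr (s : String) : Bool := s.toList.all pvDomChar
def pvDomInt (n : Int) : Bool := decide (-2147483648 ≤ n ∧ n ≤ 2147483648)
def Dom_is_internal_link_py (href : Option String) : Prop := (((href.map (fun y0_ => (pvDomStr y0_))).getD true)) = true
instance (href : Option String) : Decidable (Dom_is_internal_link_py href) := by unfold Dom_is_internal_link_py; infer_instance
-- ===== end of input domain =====

-- B replaces A's startswith scan over ten bad prefixes by a single walk of href through a
-- character trie of the bad prefixes, built once (objective: alternative algorithm).

-- ===== PORT A =====
def pvBadPrefixes : List String :=
  ["Special:", "Wikipedia:", "Help:", "Template:", "Template_talk:",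
   "Talk:", "User:", "Category:", "Portal:", "File:"]

def is_internal_link_py (href : Option String) : Bool :=
  match href with
  | none => false          -- 'not href' is true for None …
  | some s =>
    if s = "" then false   -- … and for the empty string
    else PySem.Str.startswith s "/wiki/"
         && !(pvBadPrefixes.any fun p => PySem.Str.startswith s ("/wiki/" ++ p))

-- ===== PORT B =====
/- Python B's trie is a dict of dicts with a `None`-key terminal marker.  Ported as a
   first-child/next-sibling tree (no nested inductive): `kid c term children siblings`
   is one dict entry `c ↦ node`, with the child node's terminal flag (`None in node`)
   carried inline as `term`; a whole node is a pair (terminal flag, kid chain). -/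
inductive PvKids where
  | nil  : PvKids
  | kid  : Char → Bool → PvKids → PvKids → PvKids
  deriving DecidableEq, Repr

-- `node.setdefault(ch, {})` followed by continuing the insertion: update (or create) the
-- entry for `c` in the kid chain by applying the continuation `f` to the child node
def pvUpd (k : PvKids) (c : Char) (f : Bool → PvKids → Bool × PvKids) : PvKids :=
  match k with
  | .nil => let bk := f false .nil; .kid c bk.1 bk.2 .nil
  | .kid d bd kd rest =>
      if d = c then let bk := f bd kd; .kid d bk.1 bk.2 rest
      else .kid d bd kd (pvUpd rest c f)

-- port of the inner `node = node.setdefault(ch, {})` loop + final `node[None] = True`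
def pvInsert (b : Bool) (k : PvKids) (w : List Char) : Bool × PvKids :=
  match w with
  | [] => (true, k)
  | c :: cs => (b, pvUpd k c (fun bd kd => pvInsert bd kd cs))

-- port of `_build_trie("/wiki/" + p for p in _BAD_PREFIXES)` (built once at module load)
def pvBadTrie : Bool × PvKids :=
  pvBadPrefixes.foldl (fun bk p => pvInsert bk.1 bk.2 ("/wiki/" ++ p).toList) (false, .nil)

-- `node.get(ch)`
def pvFindK (k : PvKids) (c : Char) : Option (Bool × PvKids) :=
  match k with
  | .nil => none
  | .kid d b kd rest => if d = c then some (b, kd) else pvFindK rest c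

-- the `for ch in href` walk
def pvWalk (b : Bool) (k : PvKids) (cs : List Char) : Bool :=
  match cs with
  | [] => !b                      -- `return None not in node`
  | c :: rest =>
    if b then false               -- `if None in node: return False`
    else
      match pvFindK k c with
      | none => true              -- `if node is None: return True`
      | some bk => pvWalk bk.1 bk.2 rest

def is_internal_link_py_alt (href : Option String) : Bool :=
  match href with
  | none => false
  | some s =>
    if s = "" || !(PySem.Str.startswith s "/wiki/") then false
    else pvWalk pvBadTrie.1 pvBadTrie.2 s.toList

-- ===== PRECONDITION & SPEC =====
def Spec_is_internal_link_py (href : Option String) (out : Bool) : Prop := out = is_internal_link_py_alt href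
instance (href : Option String) (out : Bool) : Decidable (Spec_is_internal_link_py href out) := by unfold Spec_is_internal_link_py; infer_instance

-- ===== CLAIM (what is proved, stated in full; the proofs are below) =====
def Claim_equal_is_internal_link_py : Prop := ∀ (href : Option String), Dom_is_internal_link_py href → Spec_is_internal_link_py href (is_internal_link_py href)

-- ===== LEMMAS AND PROOFS =====

-- the words stored in a kid chain / a node
def pvWordsK : PvKids → List (List Char)
  | .nil => []
  | .kid d b k rest => (if b then [[d]] else []) ++ (pvWordsK k).map (d :: ·) ++ pvWordsK rest

def pvWords (b : Bool) (k : PvKids) : List (List Char) :=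
  (if b then [[]] else []) ++ pvWordsK k

-- sibling characters, and well-formedness: distinct sibling chars at every level
def pvChars : PvKids → List Char
  | .nil => []
  | .kid d _ _ rest => d :: pvChars rest

def pvNodupK : PvKids → Bool
  | .nil => true
  | .kid d _ k rest => !decide (d ∈ pvChars rest) && pvNodupK k && pvNodupK rest

theorem pvWordsK_prefix_nil (k : PvKids) : (pvWordsK k).any (fun w => w.isPrefixOf []) = false := by
  induction k with
  | nil => rfl
  | kid d b kd rest ihk ihr =>
    simp only [pvWordsK, List.any_append, List.any_map, ihr, Bool.or_false]
    cases b <;> simp [Function.comp, List.isPrefixOf]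

theorem pvWordsK_prefix_of_not_mem (k : PvKids) (c : Char) (cs : List Char)
    (h : c ∉ pvChars k) :
    (pvWordsK k).any (fun w => w.isPrefixOf (c :: cs)) = false := by
  induction k with
  | nil => rfl
  | kid d b kd rest ihk ihr =>
    rw [pvChars] at h
    have h1 : c ≠ d := fun e => h (e ▸ List.mem_cons_self)
    have h2 : c ∉ pvChars rest := fun m => h (List.mem_cons_of_mem _ m)
    have hdc : (d == c) = false := beq_eq_false_iff_ne.mpr (Ne.symm h1)
    simp only [pvWordsK, List.any_append, List.any_map, ihr h2, Bool.or_false]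
    cases b <;> simp [Function.comp, List.isPrefixOf_cons₂, hdc]

theorem pvFindK_nodup (k : PvKids) (c : Char) (b' : Bool) (k' : PvKids)
    (hn : pvNodupK k = true) (hf : pvFindK k c = some (b', k')) : pvNodupK k' = true := by
  induction k with
  | nil => simp [pvFindK] at hf
  | kid d b kd rest ihk ihr =>
    simp only [pvNodupK, Bool.and_eq_true] at hn
    by_cases hdc : d = c
    · simp only [pvFindK, if_pos hdc, Option.some.injEq, Prod.mk.injEq] at hf
      exact hf.2 ▸ hn.1.2
    · exact ihr hn.2 (by simpa [pvFindK, hdc] using hf)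

theorem pvFindK_words (k : PvKids) (c : Char) (cs : List Char) (hn : pvNodupK k = true) :
    (pvWordsK k).any (fun w => w.isPrefixOf (c :: cs)) =
      (match pvFindK k c with
       | none => false
       | some bk => (pvWords bk.1 bk.2).any (fun w => w.isPrefixOf cs)) := by
  induction k with
  | nil => rfl
  | kid d b kd rest ihk ihr =>
    simp only [pvNodupK, Bool.and_eq_true] at hn
    by_cases hdc : d = c
    · subst hdc
      have hrest : (pvWordsK rest).any (fun w => w.isPrefixOf (d :: cs)) = false :=
        pvWordsK_prefix_of_not_mem rest d cs (by simpa using hn.1.1)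
      have hmap : ((pvWordsK kd).any ((fun w => w.isPrefixOf (d :: cs)) ∘ fun x => d :: x))
          = (pvWordsK kd).any (fun w => w.isPrefixOf cs) :=
        List.any_congr rfl (fun w => by simp [Function.comp])
      simp only [pvWordsK, pvFindK, List.any_append, List.any_map, hrest,
        Bool.or_false, pvWords, hmap]
      cases b <;> simp [List.isPrefixOf]
    · have hdc' : (d == c) = false := by simp [hdc]
      simp only [pvWordsK, pvFindK, if_neg hdc, List.any_append, List.any_map, ihr hn.2]
      cases b <;> simp [Function.comp, List.isPrefixOf_cons₂, hdc']

theorem pvWalk_eq (cs : List Char) : ∀ (b : Bool) (k : PvKids), pvNodupK k = true →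
    pvWalk b k cs = !((pvWords b k).any (fun w => w.isPrefixOf cs)) := by
  induction cs with
  | nil =>
    intro b k _
    simp only [pvWalk, pvWords, List.any_append, pvWordsK_prefix_nil, Bool.or_false]
    cases b <;> simp [List.isPrefixOf]
  | cons c rest ih =>
    intro b k hn
    cases b with
    | true => simp [pvWalk, pvWords, List.isPrefixOf]
    | false =>
      simp only [pvWalk, pvWords, Bool.false_eq_true, if_false, List.nil_append,
        pvFindK_words k c rest hn]
      cases hf : pvFindK k c with
      | none => rfl
      | some bk => exact ih bk.1 bk.2 (pvFindK_nodup k c bk.1 bk.2 hn (by simpa using hf))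

theorem pvBadTrie_nodup : pvNodupK pvBadTrie.2 = true := by decide

theorem pvBadTrie_words :
    pvWords pvBadTrie.1 pvBadTrie.2 =
      [("/wiki/" ++ "Special:").toList, ("/wiki/" ++ "Wikipedia:").toList,
       ("/wiki/" ++ "Help:").toList, ("/wiki/" ++ "Template:").toList,
       ("/wiki/" ++ "Template_talk:").toList, ("/wiki/" ++ "Talk:").toList,
       ("/wiki/" ++ "User:").toList, ("/wiki/" ++ "Category:").toList,
       ("/wiki/" ++ "Portal:").toList, ("/wiki/" ++ "File:").toList] := by decide

theorem pvWalk_badTrie (cs : List Char) :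
    pvWalk pvBadTrie.1 pvBadTrie.2 cs =
      !(pvBadPrefixes.any fun p => ("/wiki/" ++ p).toList.isPrefixOf cs) := by
  rw [pvWalk_eq cs _ _ pvBadTrie_nodup, pvBadTrie_words]
  simp [pvBadPrefixes, List.any]

theorem is_internal_link_py_eq_alt (href : Option String) :
    is_internal_link_py href = is_internal_link_py_alt href := by
  cases href with
  | none => rfl
  | some s =>
    by_cases hs : s = ""
    · simp [is_internal_link_py, is_internal_link_py_alt, hs]
    · cases hw : PySem.Str.startswith s "/wiki/" with
      | false =>
        simp only [is_internal_link_py, is_internal_link_py_alt, if_neg hs, hw,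
          Bool.false_and, Bool.not_false, Bool.or_true, if_true]
      | true =>
        have hsdec : (decide (s = "") : Bool) = false := by simp [hs]
        simp only [is_internal_link_py, is_internal_link_py_alt, if_neg hs, hw, hsdec,
          Bool.not_true, Bool.or_false, Bool.false_eq_true, if_false, Bool.true_and,
          pvWalk_badTrie]
        congr 1

-- ===== VERDICT (by name: the statement is the Claim_ definition above) =====
theorem is_internal_link_py_spec : Claim_equal_is_internal_link_py := by
  intro href _
  unfold Spec_is_internal_link_py
  exact is_internal_link_py_eq_alt href
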